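-- pv_equiv track=rewrite | github.com/nguyenvantu11052002/Python-PTIT | PY02029 - BẦU CỬ.py | check
-- ===== SOURCE A (Python) =====
-- def check(f):
--     res = []
--     for i in f:
--         res.append(i[1])
--     for i in range(len(res) - 1):
--         if res[i] != res[i + 1]:
--             return True
--     return False
-- ===== SOURCE B (Python) =====
-- def check(f):
--     return len({x[1] for x in f}) > 1
-- ===== Notes on version B (the rewrite author's own statement) =====
-- stated objective: idiomatic
-- what changed: Replaces A's build-a-list-then-scan-adjacent-pairs loop with a one-line set comprehension of the second fields and a cardinality test (len > 1).
import Mathlib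
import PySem

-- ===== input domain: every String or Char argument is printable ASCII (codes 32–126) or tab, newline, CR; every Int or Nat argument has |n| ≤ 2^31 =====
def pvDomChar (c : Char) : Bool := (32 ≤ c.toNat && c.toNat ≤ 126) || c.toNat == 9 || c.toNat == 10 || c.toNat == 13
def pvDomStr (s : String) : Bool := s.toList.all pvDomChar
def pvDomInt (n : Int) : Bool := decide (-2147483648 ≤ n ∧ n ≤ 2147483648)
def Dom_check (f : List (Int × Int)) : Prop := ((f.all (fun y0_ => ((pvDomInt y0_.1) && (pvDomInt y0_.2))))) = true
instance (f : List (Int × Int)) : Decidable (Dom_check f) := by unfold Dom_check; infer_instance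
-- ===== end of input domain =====

-- B replaces A's collect-then-scan-adjacent loop with a set of the second fields and a cardinality test (idiomatic, same cost).


-- ===== PORT A =====
def check (f : List (Int × Int)) : Bool :=
  let res := f.foldl (fun r i => r ++ [i.2]) []
  (PySem.List.pyRange 0 ((res.length : Int) - 1) 1).any
    (fun i => !(PySem.List.pyGetD res i 0 == PySem.List.pyGetD res (i + 1) 0))

-- ===== PORT B =====
def check_alt (f : List (Int × Int)) : Bool :=
  decide (1 < PySem.Set.len (PySem.Set.ofList (f.map (fun x => x.2))))

-- ===== PRECONDITION & SPEC =====
def Spec_check (f : List (Int × Int)) (out : Bool) : Prop := out = check_alt f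
instance (f : List (Int × Int)) (out : Bool) : Decidable (Spec_check f out) := by unfold Spec_check; infer_instance

-- ===== CLAIM (what is proved, stated in full; the proofs are below) =====
def Claim_equal_check : Prop := ∀ (f : List (Int × Int)), Dom_check f → Spec_check f (check f)

-- ===== LEMMAS AND PROOFS =====

-- A's first loop builds f.map (·.2)
theorem foldl_append_snd (f : List (Int × Int)) (acc : List Int) :
    f.foldl (fun r i => r ++ [i.2]) acc = acc ++ f.map (fun x => x.2) := by
  induction f generalizing acc with
  | nil => simp [List.foldl]
  | cons a t ih => simp [List.foldl, ih]

-- adjacent-pair scan, as a structural recursion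
def adj : List Int → Bool
  | a :: b :: t => (!(a == b)) || adj (b :: t)
  | _ => false

theorem adj_eq_not_all (t : List Int) (a : Int) :
    adj (a :: t) = !(t.all (fun x => x == a)) := by
  induction t generalizing a with
  | nil => simp [adj]
  | cons b t ih =>
    show ((!(a == b)) || adj (b :: t)) = _
    rw [ih b]
    by_cases h : a = b
    · subst h; simp
    · have h1 : (a == b) = false := by simpa using h
      have h2 : (b == a) = false := by simpa using Ne.symm h
      simp [h1, h2]

theorem any_range_eq_adj (g : List Int) :
    (PySem.List.pyRange 0 ((g.length : Int) - 1) 1).any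
      (fun i => !(PySem.List.pyGetD g i 0 == PySem.List.pyGetD g (i + 1) 0)) = adj g := by
  induction g with
  | nil => simp [PySem.List.pyRange_one_eq_nil, adj]
  | cons a t ih =>
    cases t with
    | nil => simp [PySem.List.pyRange_one_eq_nil, adj]
    | cons b t' =>
      have hlen : ((a :: b :: t').length : Int) - 1 = ((b :: t').length : Int) := by
        push_cast [List.length_cons]; ring
      rw [hlen]
      have hpos : (0 : Int) < ((b :: t').length : Int) := by
        have : 0 < (b :: t').length := by simp
        exact_mod_cast this
      rw [PySem.List.pyRange_one_cons hpos, List.any_cons]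
      simp only [zero_add]
      have h0 : (!(PySem.List.pyGetD (a :: b :: t') 0 0 == PySem.List.pyGetD (a :: b :: t') 1 0))
          = !(a == b) := by
        simp [PySem.List.pyGetD_ofNat']
      rw [h0]
      have hshift :
          (PySem.List.pyRange 1 ((b :: t').length : Int) 1).any
            (fun i => !(PySem.List.pyGetD (a :: b :: t') i 0 == PySem.List.pyGetD (a :: b :: t') (i + 1) 0))
          = (PySem.List.pyRange 0 (((b :: t').length : Int) - 1) 1).any
            (fun i => !(PySem.List.pyGetD (b :: t') i 0 == PySem.List.pyGetD (b :: t') (i + 1) 0)) := by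
        rw [PySem.List.pyRange_one, PySem.List.pyRange_one, List.any_map, List.any_map]
        simp only [sub_zero]
        apply List.any_congr rfl
        intro k
        have h1 : PySem.List.pyGetD (a :: b :: t') (1 + (k : Int)) 0
            = PySem.List.pyGetD (b :: t') ((0 : Int) + (k : Int)) 0 := by
          have : (1 : Int) + (k : Int) = ((k + 1 : Nat) : Int) := by push_cast; ring
          rw [this]
          have : (0 : Int) + (k : Int) = ((k : Nat) : Int) := by ring
          rw [this]
          rw [PySem.List.pyGetD_natCast, PySem.List.pyGetD_natCast]
          rfl
        have h2 : PySem.List.pyGetD (a :: b :: t') (1 + (k : Int) + 1) 0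
            = PySem.List.pyGetD (b :: t') ((0 : Int) + (k : Int) + 1) 0 := by
          have e1 : (1 : Int) + (k : Int) + 1 = ((k + 2 : Nat) : Int) := by push_cast; ring
          have e2 : (0 : Int) + (k : Int) + 1 = ((k + 1 : Nat) : Int) := by push_cast; ring
          rw [e1, e2, PySem.List.pyGetD_natCast, PySem.List.pyGetD_natCast]
          rfl
        simp [h1, h2]
      rw [hshift, ih]
      rfl

-- cardinality of a fold of Set.add over a nonempty start
theorem one_lt_foldl_add (t : List Int) (s : List Int) (hs : s ≠ []) :
    (1 < (t.foldl PySem.Set.add s).length) ↔ (1 < s.length ∨ ∃ x ∈ t, x ∉ s) := by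
  induction t generalizing s with
  | nil => simp
  | cons x t' ih =>
    by_cases hx : x ∈ s
    · have hadd : PySem.Set.add s x = s := by
        simp [PySem.Set.add, PySem.Set.contains, hx]
      rw [List.foldl_cons, hadd, ih s hs]
      constructor
      · rintro (h | ⟨y, hy, hys⟩)
        · exact Or.inl h
        · exact Or.inr ⟨y, List.mem_cons_of_mem _ hy, hys⟩
      · rintro (h | ⟨y, hy, hys⟩)
        · exact Or.inl h
        · rcases List.mem_cons.mp hy with rfl | hy'
          · exact absurd hx hys
          · exact Or.inr ⟨y, hy', hys⟩
    · have hadd : PySem.Set.add s x = s ++ [x] := by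
        simp [PySem.Set.add, PySem.Set.contains, hx]
      rw [List.foldl_cons, hadd, ih (s ++ [x]) (by simp)]
      have hlen : 1 ≤ s.length := List.length_pos_iff.mpr hs
      constructor
      · intro _; exact Or.inr ⟨x, List.mem_cons_self, hx⟩
      · intro _; left; simp; omega

theorem one_lt_ofList_cons (a : Int) (t : List Int) :
    (1 < (PySem.Set.ofList (a :: t)).length) ↔ ∃ x ∈ t, x ≠ a := by
  have h : PySem.Set.ofList (a :: t) = t.foldl PySem.Set.add [a] := by
    rw [PySem.Set.ofList_eq_foldl]
    simp [List.foldl_cons, PySem.Set.add, PySem.Set.contains]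
  rw [h, one_lt_foldl_add t [a] (by simp)]
  simp

-- ===== VERDICT (by name: the statement is the Claim_ definition above) =====
theorem check_spec : Claim_equal_check := by
  intro f _
  unfold Spec_check check check_alt
  rw [foldl_append_snd]
  simp only [List.nil_append]
  rw [any_range_eq_adj]
  cases hg : f.map (fun x => x.2) with
  | nil => simp [adj, PySem.Set.ofList, PySem.Set.len]
  | cons a t =>
    rw [adj_eq_not_all]
    by_cases hex : ∃ x ∈ t, x ≠ a
    · have hall : t.all (fun x => x == a) = false := by
        obtain ⟨x, hx, hxa⟩ := hex
        exact List.all_eq_false.mpr ⟨x, hx, by simpa using hxa⟩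
      rw [hall]
      have hlt := (one_lt_ofList_cons a t).mpr hex
      simp [PySem.Set.len]
      exact_mod_cast hlt
    · have hall : t.all (fun x => x == a) = true := by
        simp only [List.all_eq_true]
        intro x hx
        by_contra h
        exact hex ⟨x, hx, by simpa using h⟩
      rw [hall]
      have hle : ¬ 1 < (PySem.Set.ofList (a :: t)).length :=
        fun h => hex ((one_lt_ofList_cons a t).mp h)
      simp [PySem.Set.len]
      omega
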